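-- pv_equiv track=rewrite | github.com/hauteville86/My-Custom-XML-Tools | propToi18n.py | convert_key_element
-- ===== SOURCE A (Python) =====
-- def convert_key_element(element):
-- 	newElement = ''
-- 	for j in range(len(element)):
-- 		character = element[j]
-- 		if not character == '\'':
-- 			if character == '{' or character == '}':
-- 				character += '\n'
-- 			newElement += character
-- 	return newElement
-- ===== SOURCE B (Python) =====
-- def convert_key_element(element):
-- 	return element.replace("'", "").replace('{', '{\n').replace('}', '}\n')
-- ===== Notes on version B (the rewrite author's own statement) =====
-- stated objective: idiomatic
-- what changed: Replaces the per-character indexed loop with branching string concatenation by three chained branch-free str.replace passes (drop quotes, then newline after each brace); replace runs in C, avoiding quadratic Python-level concatenation.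
import Mathlib
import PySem

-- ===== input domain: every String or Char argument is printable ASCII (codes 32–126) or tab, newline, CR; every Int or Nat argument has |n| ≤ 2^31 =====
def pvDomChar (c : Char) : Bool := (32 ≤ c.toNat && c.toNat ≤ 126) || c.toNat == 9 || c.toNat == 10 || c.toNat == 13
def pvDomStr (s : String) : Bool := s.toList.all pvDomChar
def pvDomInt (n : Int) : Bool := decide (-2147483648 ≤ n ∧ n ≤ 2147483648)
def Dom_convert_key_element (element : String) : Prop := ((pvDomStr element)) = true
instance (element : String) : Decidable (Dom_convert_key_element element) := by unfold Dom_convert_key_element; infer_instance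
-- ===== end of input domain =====

-- B replaces A's per-character indexed loop by three chained branch-free str.replace passes (idiomatic; return value only).

-- ===== PORT A =====
-- newElement is kept as a List Char; String.ofList at the end converts it back (strings as char lists, exact).
def convert_key_element (element : String) : String :=
  String.ofList
    ((PySem.List.pyRange 0 (PySem.Str.len element) 1).foldl
      (fun newElement j =>
        let character := PySem.List.pyGetD element.toList j ' '
        if ¬ (character = '\'') then
          let character := if character = '{' ∨ character = '}' then [character, '\n'] else [character]
          newElement ++ character
        else newElement)
      [])

-- ===== PORT B =====
def convert_key_element_alt (element : String) : String :=
  PySem.Str.replace (PySem.Str.replace (PySem.Str.replace element "'" "") "{" "{\n") "}" "}\n"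

-- ===== PRECONDITION & SPEC =====
def Spec_convert_key_element (element : String) (out : String) : Prop := out = convert_key_element_alt element
instance (element : String) (out : String) : Decidable (Spec_convert_key_element element out) := by unfold Spec_convert_key_element; infer_instance

-- ===== CLAIM (what is proved, stated in full; the proofs are below) =====
def Claim_equal_convert_key_element : Prop := ∀ (element : String), Dom_convert_key_element element → Spec_convert_key_element element (convert_key_element element)

-- ===== LEMMAS AND PROOFS =====

-- replace with a single-character pattern is a flatMap over the characters
theorem replace_go_single (o : Char) (new : List Char) :
    ∀ (fuel : Nat) (l acc : List Char), l.length ≤ fuel →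
      PySem.Chars.replace.go [o] new fuel l acc
        = acc.reverse ++ l.flatMap (fun c => if c = o then new else [c]) := by
  intro fuel
  induction fuel with
  | zero =>
    intro l acc h
    have : l = [] := List.length_eq_zero_iff.mp (Nat.le_zero.mp h)
    subst this
    simp [PySem.Chars.replace.go]
  | succ n ih =>
    intro l acc h
    cases l with
    | nil => simp [PySem.Chars.replace.go]
    | cons c t =>
      by_cases hc : c = o
      · have hpre : List.isPrefixOf [o] (c :: t) = true := by
          simp [List.isPrefixOf, hc]
        simp only [PySem.Chars.replace.go, hpre, if_pos]
        rw [ih]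
        · subst hc; simp
        · simpa using Nat.le_of_succ_le_succ h
      · have hpre : List.isPrefixOf [o] (c :: t) = false := by
          simp [List.isPrefixOf]
          exact fun h' => (hc h'.symm).elim
        simp only [PySem.Chars.replace.go, hpre, Bool.false_eq_true, if_false]
        rw [ih]
        · simp [hc]
        · simpa using Nat.le_of_succ_le_succ h

theorem replace_single (s : List Char) (o : Char) (new : List Char) :
    PySem.Chars.replace s [o] new = s.flatMap (fun c => if c = o then new else [c]) := by
  simp only [PySem.Chars.replace, List.isEmpty_cons, Bool.false_eq_true, if_false]
  simpa using replace_go_single o new s.length s [] (le_refl _)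

-- A's loop body, accumulated over a char list, is a flatMap
def fA (c : Char) : List Char :=
  if ¬ (c = '\'') then (if c = '{' ∨ c = '}' then [c, '\n'] else [c]) else []

theorem foldlA_eq_flatMap (l : List Char) (acc : List Char) :
    l.foldl
      (fun newElement c =>
        if ¬ (c = '\'') then
          newElement ++ (if c = '{' ∨ c = '}' then [c, '\n'] else [c])
        else newElement)
      acc = acc ++ l.flatMap fA := by
  induction l generalizing acc with
  | nil => simp
  | cons c t ih =>
    rw [List.foldl_cons, ih]
    by_cases hc : c = '\''
    · simp [hc, fA]
    · by_cases hb : c = '{' ∨ c = '}' <;> simp [hc, hb, fA]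

-- the three single-char replaces compose to exactly fA
theorem triple_flatMap_eq (l : List Char) :
    ((l.flatMap (fun c => if c = '\'' then [] else [c])).flatMap
        (fun c => if c = '{' then ['{', '\n'] else [c])).flatMap
      (fun c => if c = '}' then ['}', '\n'] else [c]) = l.flatMap fA := by
  rw [List.flatMap_assoc, List.flatMap_assoc]
  apply List.flatMap_congr
  intro c _
  by_cases h1 : c = '\''
  · simp [h1, fA]
  · by_cases h2 : c = '{'
    · simp [h2, fA]
    · by_cases h3 : c = '}' <;> simp [h1, h2, h3, fA]

-- ===== VERDICT (by name: the statement is the Claim_ definition above) =====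
theorem convert_key_element_spec : Claim_equal_convert_key_element := by
  intro element _
  unfold Spec_convert_key_element convert_key_element convert_key_element_alt
  simp only [PySem.Str.replace, String.toList_ofList]
  congr 1
  have e1 : "'".toList = ['\''] := rfl
  have e2 : "".toList = ([] : List Char) := rfl
  have e3 : "{".toList = ['{'] := rfl
  have e4 : "{\n".toList = ['{', '\n'] := rfl
  have e5 : "}".toList = ['}'] := rfl
  have e6 : "}\n".toList = ['}', '\n'] := rfl
  rw [e1, e2, e3, e4, e5, e6, replace_single, replace_single, replace_single, triple_flatMap_eq]
  have hlen : PySem.Str.len element = ((element.toList.length : Int)) := by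
    simp [PySem.Str.len]
  rw [hlen,
    PySem.List.foldl_pyRange_zero_pyGetD' element.toList ' '
      (fun newElement c =>
        if ¬ (c = '\'') then
          newElement ++ (if c = '{' ∨ c = '}' then [c, '\n'] else [c])
        else newElement) [],
    foldlA_eq_flatMap]
  simp
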